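-- pv_equiv track=rewrite | github.com/yensi-aiorg/nc-dev-system | src/parser/extractor.py | _detect_ambiguities
-- ===== SOURCE A (Python) =====
-- _AMBIGUITY_PHRASES = [
--     "tbd", "to be decided", "to be determined", "not sure", "maybe",
--     "possibly", "or similar", "etc.", "and more", "as needed",
--     "something like", "some kind of", "somehow", "figure out",
--     "we'll decide later", "placeholder", "might need", "could be",
-- ]
--
-- def _detect_ambiguities(text: str) -> list[str]:
--     """Flag ambiguous language in requirements text."""
--     ambiguities: list[str] = []
--     lower = text.lower()
--     for phrase in _AMBIGUITY_PHRASES: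
--         if phrase in lower:
--             # Find the sentence containing the phrase
--             for line in text.splitlines():
--                 if phrase in line.lower():
--                     cleaned = line.strip().lstrip("-*+ ").strip()
--                     if cleaned:
--                         ambiguities.append(
--                             f"Ambiguous requirement: \"{cleaned}\" (contains '{phrase}')"
--                         )
--     return ambiguities
-- ===== SOURCE B (Python) =====
-- _AMBIGUITY_PHRASES = [
--     "tbd", "to be decided", "to be determined", "not sure", "maybe",
--     "possibly", "or similar", "etc.", "and more", "as needed",
--     "something like", "some kind of", "somehow", "figure out",
--     "we'll decide later", "placeholder", "might need", "could be",
-- ]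
--
-- def _detect_ambiguities(text: str) -> list[str]:
--     """Flag ambiguous language in requirements text (single pass over lines)."""
--     buckets = [[] for _ in _AMBIGUITY_PHRASES]
--     for line in text.splitlines():
--         low = line.lower()
--         cleaned = line.strip().lstrip("-*+ ").strip()
--         if not cleaned:
--             continue
--         buckets = [
--             b + [f"Ambiguous requirement: \"{cleaned}\" (contains '{p}')"] if p in low else b
--             for b, p in zip(buckets, _AMBIGUITY_PHRASES)
--         ]
--     return [m for b in buckets for m in b]
-- ===== Notes on version B (the rewrite author's own statement) =====
-- stated objective: alternative
-- what changed: A rescans text.splitlines() and re-lowercases every line once per matching phrase (phrase-major nested loops with a redundant whole-text guard); B splits, lowercases and cleans each line exactly once in a single line-major pass, collecting hits into one bucket per phrase and concatenating the buckets in phrase order.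
import Mathlib
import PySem

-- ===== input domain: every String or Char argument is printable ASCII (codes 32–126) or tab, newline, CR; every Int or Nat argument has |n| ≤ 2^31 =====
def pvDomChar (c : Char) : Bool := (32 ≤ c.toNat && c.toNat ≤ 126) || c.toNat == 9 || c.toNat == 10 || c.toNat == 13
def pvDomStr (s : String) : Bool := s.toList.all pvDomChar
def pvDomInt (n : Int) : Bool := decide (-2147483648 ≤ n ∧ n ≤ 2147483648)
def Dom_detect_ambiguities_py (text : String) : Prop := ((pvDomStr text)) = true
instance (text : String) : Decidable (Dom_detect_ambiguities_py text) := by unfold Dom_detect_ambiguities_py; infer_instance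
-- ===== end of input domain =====

-- B replaces A's phrase-major rescan of the text (one splitlines + lower pass per phrase)
-- with a single pass over the lines that fills one bucket per phrase, concatenated at the end
-- (objective: alternative decomposition; same return value).

-- shared helpers (the module constant and the f-string, identical in Source A and Source B)
def pvPhrases : List String :=
  ["tbd", "to be decided", "to be determined", "not sure", "maybe",
   "possibly", "or similar", "etc.", "and more", "as needed",
   "something like", "some kind of", "somehow", "figure out",
   "we'll decide later", "placeholder", "might need", "could be"]

-- exact port of str.lstrip(chars): drop leading characters belonging to chars
def pvLstrip (s chars : String) : String :=
  String.ofList (s.toList.dropWhile (fun c => chars.toList.contains c))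

-- line.strip().lstrip("-*+ ").strip()
def pvClean (line : String) : String :=
  PySem.Str.strip (pvLstrip (PySem.Str.strip line) "-*+ ")

-- f"Ambiguous requirement: \"{cleaned}\" (contains '{phrase}')"
def pvFmt (cleaned phrase : String) : String :=
  String.ofList ("Ambiguous requirement: \"".toList ++ cleaned.toList ++
             "\" (contains '".toList ++ phrase.toList ++ "')".toList)

-- ===== PORT A =====
def detect_ambiguities_py (text : String) : List String :=
  let lower := PySem.Str.lower text
  pvPhrases.foldl (fun ambiguities phrase =>
    if PySem.Str.isIn phrase lower then
      (PySem.Str.splitlines text).foldl (fun ambiguities line =>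
        if PySem.Str.isIn phrase (PySem.Str.lower line) then
          let cleaned := pvClean line
          if cleaned ≠ "" then ambiguities ++ [pvFmt cleaned phrase]
          else ambiguities
        else ambiguities) ambiguities
    else ambiguities) []

-- ===== PORT B =====
def detect_ambiguities_py_alt (text : String) : List String :=
  let buckets := (PySem.Str.splitlines text).foldl (fun buckets line =>
    let low := PySem.Str.lower line
    let cleaned := pvClean line
    if cleaned = "" then buckets
    else List.zipWith (fun b p =>
        if PySem.Str.isIn p low then b ++ [pvFmt cleaned p] else b)
      buckets pvPhrases)
    (pvPhrases.map (fun _ => []))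
  buckets.flatten

-- ===== PRECONDITION & SPEC =====
def Spec_detect_ambiguities_py (text : String) (out : List String) : Prop := out = detect_ambiguities_py_alt text
instance (text : String) (out : List String) : Decidable (Spec_detect_ambiguities_py text out) := by unfold Spec_detect_ambiguities_py; infer_instance

-- ===== CLAIM (what is proved, stated in full; the proofs are below) =====
def Claim_equal_detect_ambiguities_py : Prop := ∀ (text : String), Dom_detect_ambiguities_py text → Spec_detect_ambiguities_py text (detect_ambiguities_py text)

-- ===== LEMMAS AND PROOFS =====

-- per-phrase, per-line contribution common to both programs
def pvF (phrase line : String) : List String :=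
  if pvClean line = "" then []
  else if PySem.Str.isIn phrase (PySem.Str.lower line) then [pvFmt (pvClean line) phrase]
  else []

-- every piece of splitlines.go is an accumulated line or an infix of the remaining input
theorem pvGo_mem (isB : Char → Bool) (s cur : List Char) (acc : List (List Char))
    (l : List Char) (h : l ∈ PySem.Chars.splitlines.go isB s cur acc) :
    l ∈ acc ∨ l <:+: (cur.reverse ++ s) := by
  fun_induction PySem.Chars.splitlines.go isB s cur acc with
  | case1 cur acc hc => exact Or.inl (List.mem_reverse.mp h)
  | case2 cur acc hc =>
    rcases List.mem_cons.mp (List.mem_reverse.mp h) with h | h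
    · subst h; exact Or.inr (by simp)
    · exact Or.inl h
  | case3 rest cur acc ih =>
    rcases ih h with h | h
    · rcases List.mem_cons.mp h with h | h
      · subst h; exact Or.inr (List.prefix_append _ _).isInfix
      · exact Or.inl h
    · simp only [List.reverse_nil, List.nil_append] at h
      exact Or.inr (h.trans ⟨cur.reverse ++ ['\x0d', '\n'], [], by simp⟩)
  | case4 c rest cur acc hx hB ih =>
    rcases ih h with h | h
    · rcases List.mem_cons.mp h with h | h
      · subst h; exact Or.inr (List.prefix_append _ _).isInfix
      · exact Or.inl h
    · simp only [List.reverse_nil, List.nil_append] at h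
      exact Or.inr (h.trans ⟨cur.reverse ++ [c], [], by simp⟩)
  | case5 c rest cur acc hx hB ih =>
    rcases ih h with h | h
    · exact Or.inl h
    · exact Or.inr (by simpa using h)

theorem pvSplitlines_infix (s l : List Char) (h : l ∈ PySem.Chars.splitlines s) : l <:+: s := by
  unfold PySem.Chars.splitlines at h
  rcases pvGo_mem _ _ _ _ _ h with h | h
  · simp at h
  · simpa using h

-- a phrase found in a line of text is found in the whole (lowercased) text
theorem pvIsIn_line (text line phrase : String)
    (hl : line ∈ PySem.Str.splitlines text)
    (h : PySem.Str.isIn phrase (PySem.Str.lower line) = true) :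
    PySem.Str.isIn phrase (PySem.Str.lower text) = true := by
  rw [PySem.Str.isIn_iff_infix] at h ⊢
  simp only [PySem.Str.toList_lower, PySem.Chars.lower] at h ⊢
  have hmem : line.toList ∈ PySem.Chars.splitlines text.toList := by
    have := List.mem_map_of_mem (f := String.toList) hl
    rwa [PySem.Str.splitlines_map_toList] at this
  exact h.trans ((pvSplitlines_infix _ _ hmem).map _)

-- A's inner loop appends exactly the pvF contributions of the lines
theorem pvA_inner (phrase : String) (ls : List String) (acc : List String) :
    ls.foldl (fun ambiguities line =>
        if PySem.Str.isIn phrase (PySem.Str.lower line) then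
          let cleaned := pvClean line
          if cleaned ≠ "" then ambiguities ++ [pvFmt cleaned phrase]
          else ambiguities
        else ambiguities) acc
      = acc ++ ls.flatMap (pvF phrase) := by
  induction ls generalizing acc with
  | nil => simp
  | cons l ls ih =>
    simp only [List.foldl_cons, List.flatMap_cons, ih, pvF]
    split_ifs <;> simp_all

-- A collects, phrase-major, the pvF contributions (the outer guard is redundant)
theorem pvA_eq (text : String) :
    detect_ambiguities_py text
      = pvPhrases.flatMap (fun phrase => (PySem.Str.splitlines text).flatMap (pvF phrase)) := by
  show (pvPhrases.foldl (fun ambiguities phrase =>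
    if PySem.Str.isIn phrase (PySem.Str.lower text) then
      (PySem.Str.splitlines text).foldl (fun ambiguities line =>
        if PySem.Str.isIn phrase (PySem.Str.lower line) then
          let cleaned := pvClean line
          if cleaned ≠ "" then ambiguities ++ [pvFmt cleaned phrase]
          else ambiguities
        else ambiguities) ambiguities
    else ambiguities) [] = _)
  rw [PySem.List.foldl_congr_mem pvPhrases _
        (fun acc phrase => acc ++ (PySem.Str.splitlines text).flatMap (pvF phrase)) []
        ?_]
  · exact PySem.List.foldl_append_eq_flatMap _ _ _
  · intro acc p _
    by_cases hg : PySem.Str.isIn p (PySem.Str.lower text) = true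
    · simp only [hg, if_true, pvA_inner]
    · have hz : (PySem.Str.splitlines text).flatMap (pvF p) = [] := by
        rw [List.flatMap_eq_nil_iff]
        intro l hl
        unfold pvF
        split_ifs with h1 h2
        · rfl
        · exact absurd (pvIsIn_line text l p hl h2) (by simpa using hg)
        · rfl
      simp only [Bool.not_eq_true, PySem.Str.isIn_eq, PySem.Str.toList_lower] at hg
      simp [hg, hz]

-- B's single pass keeps, for every phrase, that phrase's bucket of contributions
theorem pvB_inv (ls : List String) (g : String → List String) :
    ls.foldl (fun buckets line =>
        let low := PySem.Str.lower line
        let cleaned := pvClean line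
        if cleaned = "" then buckets
        else List.zipWith (fun b p =>
            if PySem.Str.isIn p low then b ++ [pvFmt cleaned p] else b)
          buckets pvPhrases)
      (pvPhrases.map g)
      = pvPhrases.map (fun p => g p ++ ls.flatMap (pvF p)) := by
  induction ls generalizing g with
  | nil => simp
  | cons l ls ih =>
    simp only [List.foldl_cons]
    by_cases hc : pvClean l = ""
    · simp only [iff_true_intro hc, if_true, ih, List.flatMap_cons]
      refine List.map_congr_left (fun p _ => ?_)
      simp [pvF, hc]
    · simp only [if_neg hc, List.zipWith_map_left, List.zipWith_self]
      have : (pvPhrases.map (fun p =>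
          if PySem.Str.isIn p (PySem.Str.lower l) then g p ++ [pvFmt (pvClean l) p] else g p))
          = pvPhrases.map (fun p => g p ++ pvF p l) := by
        refine List.map_congr_left (fun p _ => ?_)
        simp only [pvF, if_neg hc]
        split_ifs <;> simp
      rw [this, ih]
      refine List.map_congr_left (fun p _ => ?_)
      simp [pvF, hc, List.append_assoc]

theorem pvB_eq (text : String) :
    detect_ambiguities_py_alt text
      = pvPhrases.flatMap (fun phrase => (PySem.Str.splitlines text).flatMap (pvF phrase)) := by
  unfold detect_ambiguities_py_alt
  rw [pvB_inv (PySem.Str.splitlines text) (fun _ => [])]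
  simp [← List.flatMap_def]

-- ===== VERDICT (by name: the statement is the Claim_ definition above) =====
theorem detect_ambiguities_py_spec : Claim_equal_detect_ambiguities_py := by
  intro text _
  unfold Spec_detect_ambiguities_py
  rw [pvA_eq, pvB_eq]
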